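-- pv_equiv track=rewrite | github.com/chuegue/AoC2024 | day2/main.py | check_ascending2
-- ===== SOURCE A (Python) =====
-- def check_ascending(arr):
--     for i in range(1, len(arr)):
--         if arr[i] <= arr[i-1] or arr[i] - arr[i-1] > 3:
--             return 0
--     return 1
--
-- def check_ascending2(arr):
--     if check_ascending(arr) == 0:
--         for i in range(len(arr)):
--             arrcpy = arr.copy()
--             arrcpy.pop(i)
--             if check_ascending(arrcpy) == 1:
--                 return 1
--         return 0
--     else:
--         return 1
-- ===== SOURCE B (Python) =====
-- def _ok(xs):
--     return all(a < b and b - a <= 3 for a, b in zip(xs, xs[1:]))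
--
-- def check_ascending2(arr):
--     n = len(arr)
--     i = 1
--     while i < n and arr[i - 1] < arr[i] and arr[i] - arr[i - 1] <= 3:
--         i += 1
--     if i >= n:
--         return 1
--     if _ok(arr[:i - 1] + arr[i:]) or _ok(arr[:i] + arr[i + 1:]):
--         return 1
--     return 0
-- ===== Notes on version B (the rewrite author's own statement) =====
-- stated objective: faster
-- what changed: Replaced the try-every-removal quadratic scan with a single linear pass that finds the first violating adjacent pair and tests only the two possible repairs (dropping the left or the right element of that pair).
import Mathlib
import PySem

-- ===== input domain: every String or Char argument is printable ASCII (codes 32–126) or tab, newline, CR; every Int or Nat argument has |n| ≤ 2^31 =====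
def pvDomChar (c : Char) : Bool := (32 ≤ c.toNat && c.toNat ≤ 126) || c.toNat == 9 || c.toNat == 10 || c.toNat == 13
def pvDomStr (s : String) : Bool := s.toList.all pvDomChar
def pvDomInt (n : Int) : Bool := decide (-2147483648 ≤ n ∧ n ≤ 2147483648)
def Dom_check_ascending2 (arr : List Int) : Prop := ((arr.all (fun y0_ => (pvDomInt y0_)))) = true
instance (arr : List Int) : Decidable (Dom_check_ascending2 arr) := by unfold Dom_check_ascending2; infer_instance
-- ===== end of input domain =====

-- B replaces A's try-every-removal quadratic scan by a single linear pass that finds the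
-- first violating adjacent pair and tests only the two possible repairs (objective: faster).

-- ===== PORT A =====
-- check_ascending's loop over range(1, len(arr)); every index it reads is in range,
-- so pyGetD with default 0 is exact here.
def checkLoopA (arr : List Int) : List Int → Int
  | [] => 1
  | i :: rest =>
    if PySem.List.pyGetD arr i 0 ≤ PySem.List.pyGetD arr (i - 1) 0 ∨
       PySem.List.pyGetD arr i 0 - PySem.List.pyGetD arr (i - 1) 0 > 3 then 0
    else checkLoopA arr rest

def check_ascending (arr : List Int) : Int :=
  checkLoopA arr (PySem.List.pyRange 1 arr.length 1)

-- the `for i in range(len(arr))` loop of check_ascending2: arrcpy = arr.copy(); arrcpy.pop(i)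
def ca2LoopA (arr : List Int) : List Int → Int
  | [] => 0
  | i :: rest =>
    let arrcpy := arr
    match PySem.List.pop? arrcpy i with
    | none => 0   -- unreachable: i ∈ range(len(arr)) is always a valid pop index
    | some r => if check_ascending r.2 = 1 then 1 else ca2LoopA arr rest

def check_ascending2 (arr : List Int) : Int :=
  if check_ascending arr = 0 then ca2LoopA arr (PySem.List.pyRange 0 arr.length 1)
  else 1

-- ===== PORT B =====
-- _ok(xs): all adjacent pairs strictly ascend by at most 3
def okB : List Int → Bool
  | a :: b :: t => (decide (a < b) && decide (b - a ≤ 3)) && okB (b :: t)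
  | _ => true

-- the while loop of B: advance i while the pair (i-1, i) is fine
def firstBadB (arr : List Int) (i : Nat) : Nat :=
  if h : i < arr.length ∧ arr.getD (i - 1) 0 < arr.getD i 0 ∧
         arr.getD i 0 - arr.getD (i - 1) 0 ≤ 3 then
    firstBadB arr (i + 1)
  else i
termination_by arr.length - i
decreasing_by omega

def check_ascending2_alt (arr : List Int) : Int :=
  let n := arr.length
  let i := firstBadB arr 1
  if i ≥ n then 1
  else if okB (PySem.List.slice arr none (some ((i : Int) - 1)) ++
               PySem.List.slice arr (some (i : Int)) none)
       || okB (PySem.List.slice arr none (some (i : Int)) ++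
               PySem.List.slice arr (some ((i : Int) + 1)) none) then 1
  else 0

-- ===== PRECONDITION & SPEC =====
def Spec_check_ascending2 (arr : List Int) (out : Int) : Prop := out = check_ascending2_alt arr
instance (arr : List Int) (out : Int) : Decidable (Spec_check_ascending2 arr out) := by unfold Spec_check_ascending2; infer_instance

-- ===== CLAIM (what is proved, stated in full; the proofs are below) =====
def Claim_equal_check_ascending2 : Prop := ∀ (arr : List Int), Dom_check_ascending2 arr → Spec_check_ascending2 arr (check_ascending2 arr)

-- ===== LEMMAS AND PROOFS =====

-- the pair at positions (k-1, k) is a good step (stated with getD; both indices in range when 1 ≤ k < length)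
abbrev goodp (arr : List Int) (k : Nat) : Prop :=
  arr.getD (k - 1) 0 < arr.getD k 0 ∧ arr.getD k 0 - arr.getD (k - 1) 0 ≤ 3

theorem okB_iff (xs : List Int) :
    okB xs = true ↔ ∀ k, k + 1 < xs.length →
      xs.getD k 0 < xs.getD (k + 1) 0 ∧ xs.getD (k + 1) 0 - xs.getD k 0 ≤ 3 := by
  induction xs with
  | nil => simp [okB]
  | cons a t ih =>
    cases t with
    | nil => simp [okB]
    | cons b t2 =>
      rw [okB]
      simp only [Bool.and_eq_true, decide_eq_true_eq]
      rw [ih]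
      constructor
      · rintro ⟨⟨h1, h2⟩, hrest⟩ k hk
        cases k with
        | zero =>
          simp only [List.getD_cons_zero, List.getD_cons_succ]
          exact ⟨h1, h2⟩
        | succ m =>
          simp only [List.getD_cons_succ]
          exact hrest m (by simpa using hk)
      · intro h
        refine ⟨?_, ?_⟩
        · have := h 0 (by simp)
          simpa using this
        · intro k hk
          have := h (k + 1) (by simpa using hk)
          simpa using this

theorem okB_iff_goodp (xs : List Int) :
    okB xs = true ↔ ∀ k, 1 ≤ k → k < xs.length → goodp xs k := by
  rw [okB_iff]
  constructor
  · intro h k h1 h2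
    have := h (k - 1) (by omega)
    unfold goodp
    have hk : k - 1 + 1 = k := by omega
    rw [hk] at this
    exact this
  · intro h k hk
    have := h (k + 1) (by omega) (by omega)
    unfold goodp at this
    simpa using this

theorem checkLoopA_eq (arr : List Int) (j : Nat) (hj : 1 ≤ j) :
    checkLoopA arr (PySem.List.pyRange (j : Int) arr.length 1) =
      if ∀ k, j ≤ k → k < arr.length → goodp arr k then 1 else 0 := by
  generalize hfuel : arr.length - j = fuel
  induction fuel generalizing j with
  | zero =>
    rw [PySem.List.pyRange_one_eq_nil (by omega), checkLoopA, if_pos]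
    intro k hk1 hk2; omega
  | succ m ih =>
    have hjl : j < arr.length := by omega
    rw [PySem.List.pyRange_one_cons (by omega), checkLoopA]
    have hgj : (PySem.List.pyGetD arr (j : Int) 0 ≤ PySem.List.pyGetD arr ((j : Int) - 1) 0 ∨
        PySem.List.pyGetD arr (j : Int) 0 - PySem.List.pyGetD arr ((j : Int) - 1) 0 > 3) ↔
        ¬ goodp arr j := by
      have hc1 : ((j : Int) - 1) = ((j - 1 : Nat) : Int) := by omega
      rw [hc1]
      simp only [PySem.List.pyGetD_natCast]
      unfold goodp
      omega
    by_cases hb : goodp arr j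
    · rw [if_neg (by rw [hgj]; exact not_not_intro hb)]
      have hc2 : ((j : Int) + 1) = ((j + 1 : Nat) : Int) := by push_cast; ring
      rw [hc2, ih (j + 1) (by omega) (by omega)]
      by_cases hall : ∀ k, j ≤ k → k < arr.length → goodp arr k
      · rw [if_pos hall, if_pos]
        intro k hk1 hk2; exact hall k (by omega) hk2
      · rw [if_neg hall, if_neg]
        intro hall2
        apply hall
        intro k hk1 hk2
        rcases Nat.eq_or_lt_of_le hk1 with rfl | hlt
        · exact hb
        · exact hall2 k hlt hk2
    · rw [if_pos (hgj.mpr hb), if_neg]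
      intro hall
      exact hb (hall j le_rfl hjl)

theorem check_ascending_eq (arr : List Int) :
    check_ascending arr = if okB arr = true then 1 else 0 := by
  unfold check_ascending
  have h := checkLoopA_eq arr 1 le_rfl
  simp only [Nat.cast_one] at h
  rw [h]
  by_cases hall : okB arr = true
  · rw [if_pos hall, if_pos]
    exact (okB_iff_goodp arr).mp hall
  · rw [if_neg hall, if_neg]
    intro hc
    exact hall ((okB_iff_goodp arr).mpr hc)

theorem ca2LoopA_eq (arr : List Int) (j : Nat) :
    ca2LoopA arr (PySem.List.pyRange (j : Int) arr.length 1) =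
      if ∃ k < arr.length, j ≤ k ∧ okB (arr.eraseIdx k) = true then 1 else 0 := by
  generalize hfuel : arr.length - j = fuel
  induction fuel generalizing j with
  | zero =>
    rw [PySem.List.pyRange_one_eq_nil (by omega), ca2LoopA, if_neg]
    rintro ⟨k, hk, hjk, -⟩; omega
  | succ m ih =>
    have hjl : j < arr.length := by omega
    rw [PySem.List.pyRange_one_cons (by omega), ca2LoopA]
    rw [PySem.List.pop?_natCast arr j hjl]
    show (if check_ascending (arr.eraseIdx j) = 1 then 1
          else ca2LoopA arr (PySem.List.pyRange ((j : Int) + 1) arr.length 1)) = _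
    rw [check_ascending_eq]
    by_cases hE : okB (arr.eraseIdx j) = true
    · rw [if_pos hE, if_pos rfl, if_pos ⟨j, hjl, le_rfl, hE⟩]
    · rw [if_neg hE, if_neg (by omega : ¬ (0 : Int) = 1)]
      have hc2 : ((j : Int) + 1) = ((j + 1 : Nat) : Int) := by push_cast; ring
      rw [hc2, ih (j + 1) (by omega)]
      by_cases hex : ∃ k < arr.length, j ≤ k ∧ okB (arr.eraseIdx k) = true
      · obtain ⟨k, hk, hjk, hkok⟩ := hex
        have hkj : j + 1 ≤ k := by
          rcases Nat.eq_or_lt_of_le hjk with rfl | h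
          · exact absurd hkok hE
          · omega
        rw [if_pos ⟨k, hk, hkj, hkok⟩, if_pos ⟨k, hk, hjk, hkok⟩]
      · rw [if_neg, if_neg hex]
        rintro ⟨k, hk, hjk, hkok⟩
        exact hex ⟨k, hk, by omega, hkok⟩

theorem firstBadB_spec (arr : List Int) (j : Nat) (hj : 1 ≤ j)
    (hgood : ∀ k, 1 ≤ k → k < j → goodp arr k) :
    j ≤ firstBadB arr j ∧ (∀ k, 1 ≤ k → k < firstBadB arr j → goodp arr k) ∧
      (firstBadB arr j < arr.length → ¬ goodp arr (firstBadB arr j)) := by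
  generalize hfuel : arr.length - j = fuel
  induction fuel generalizing j with
  | zero =>
    rw [firstBadB, dif_neg (by omega)]
    exact ⟨le_rfl, hgood, by omega⟩
  | succ m ih =>
    rw [firstBadB]
    by_cases hc : j < arr.length ∧ arr.getD (j - 1) 0 < arr.getD j 0 ∧
        arr.getD j 0 - arr.getD (j - 1) 0 ≤ 3
    · rw [dif_pos hc]
      have hgj : goodp arr j := ⟨hc.2.1, hc.2.2⟩
      have hres := ih (j + 1) (by omega)
        (by
          intro k hk1 hk2
          rcases Nat.lt_or_ge k j with h | h
          · exact hgood k hk1 h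
          · have : k = j := by omega
            exact this ▸ hgj)
        (by omega)
      exact ⟨by omega, hres.2.1, hres.2.2⟩
    · rw [dif_neg hc]
      refine ⟨le_rfl, hgood, ?_⟩
      intro hlt hg
      exact hc ⟨hlt, hg.1, hg.2⟩

-- the heart: with the first bad pair at (i-1, i), removing any other index leaves the bad pair adjacent
theorem getD_eraseIdx_ge (l : List Int) (j k : Nat) (hj : j < l.length) (hge : j ≤ k)
    (hk : k + 1 < l.length) : (l.eraseIdx j).getD k 0 = l.getD (k + 1) 0 := by
  have hlen : (l.eraseIdx j).length = l.length - 1 := by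
    rw [List.length_eraseIdx, if_pos hj]
  rw [List.getD_eq_getElem _ _ (by omega), List.getD_eq_getElem _ _ (by omega)]
  exact List.getElem_eraseIdx_of_ge _ hge

theorem getD_eraseIdx_lt (l : List Int) (j k : Nat) (hj : j < l.length) (hlt : k < j) :
    (l.eraseIdx j).getD k 0 = l.getD k 0 := by
  have hlen : (l.eraseIdx j).length = l.length - 1 := by
    rw [List.length_eraseIdx, if_pos hj]
  rw [List.getD_eq_getElem _ _ (by omega), List.getD_eq_getElem _ _ (by omega)]
  exact List.getElem_eraseIdx_of_lt _ hlt

theorem only_two (arr : List Int) (i : Nat) (h1 : 1 ≤ i) (hi : i < arr.length)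
    (hbad : ¬ goodp arr i) (j : Nat) (hj : j < arr.length)
    (hok : okB (arr.eraseIdx j) = true) : j = i - 1 ∨ j = i := by
  by_contra hcon
  push Not at hcon
  obtain ⟨hne1, hne2⟩ := hcon
  have hlen : (arr.eraseIdx j).length = arr.length - 1 := by
    rw [List.length_eraseIdx, if_pos hj]
  have hok' := (okB_iff (arr.eraseIdx j)).mp hok
  unfold goodp at hbad
  rcases Nat.lt_or_ge j (i - 1) with hlt | hge
  · -- j < i - 1: the bad pair sits at positions (i-2, i-1) of the shortened list
    have h2 : 2 ≤ i := by omega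
    have p := hok' (i - 2) (by omega)
    have e0 : i - 2 + 1 = i - 1 := by omega
    rw [e0] at p
    rw [getD_eraseIdx_ge arr j (i - 2) hj (by omega) (by omega), e0] at p
    rw [getD_eraseIdx_ge arr j (i - 1) hj (by omega) (by omega)] at p
    have e1 : i - 1 + 1 = i := by omega
    rw [e1] at p
    exact hbad ⟨p.1, p.2⟩
  · -- i < j: the bad pair sits at positions (i-1, i) of the shortened list
    have hij : i < j := by omega
    have p := hok' (i - 1) (by omega)
    have e1 : i - 1 + 1 = i := by omega
    rw [e1] at p
    rw [getD_eraseIdx_lt arr j (i - 1) hj (by omega)] at p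
    rw [getD_eraseIdx_lt arr j i hj (by omega)] at p
    exact hbad ⟨p.1, p.2⟩

-- ===== VERDICT (by name: the statement is the Claim_ definition above) =====
theorem check_ascending2_spec : Claim_equal_check_ascending2 := by
  intro arr _
  unfold Spec_check_ascending2 check_ascending2 check_ascending2_alt
  obtain ⟨hle, hgood, hbadat⟩ := firstBadB_spec arr 1 le_rfl (by intro k h1 h2; omega)
  set i := firstBadB arr 1 with hi
  by_cases hcase : arr.length ≤ i
  · have hok : okB arr = true :=
      (okB_iff_goodp arr).mpr (fun k hk1 hk2 => hgood k hk1 (by omega))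
    rw [check_ascending_eq, if_pos hok]
    rw [if_neg (by omega : ¬ (1 : Int) = 0), if_pos hcase]
  · push Not at hcase
    have hbad : ¬ goodp arr i := hbadat hcase
    have hnok : ¬ okB arr = true := fun h =>
      hbad ((okB_iff_goodp arr).mp h i hle hcase)
    rw [check_ascending_eq, if_neg hnok, if_pos rfl]
    have h0 := ca2LoopA_eq arr 0
    simp only [Nat.cast_zero] at h0
    rw [h0]
    rw [if_neg (by omega : ¬ i ≥ arr.length)]
    have hs1 : PySem.List.slice arr none (some ((i : Int) - 1)) ++
        PySem.List.slice arr (some (i : Int)) none = arr.eraseIdx (i - 1) := by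
      rw [show ((i : Int) - 1) = ((i - 1 : Nat) : Int) by omega,
          PySem.List.slice_to_natCast, PySem.List.slice_from_natCast,
          List.eraseIdx_eq_take_drop_succ,
          show i - 1 + 1 = i by omega]
    have hs2 : PySem.List.slice arr none (some (i : Int)) ++
        PySem.List.slice arr (some ((i : Int) + 1)) none = arr.eraseIdx i := by
      rw [show ((i : Int) + 1) = ((i + 1 : Nat) : Int) by push_cast; ring,
          PySem.List.slice_to_natCast, PySem.List.slice_from_natCast,
          List.eraseIdx_eq_take_drop_succ]
    rw [hs1, hs2]
    by_cases hx : okB (arr.eraseIdx (i - 1)) = true ∨ okB (arr.eraseIdx i) = true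
    · rw [if_pos, if_pos (by simpa [Bool.or_eq_true] using hx)]
      rcases hx with h | h
      · exact ⟨i - 1, by omega, by omega, h⟩
      · exact ⟨i, hcase, by omega, h⟩
    · rw [if_neg, if_neg (by simpa [Bool.or_eq_true] using hx)]
      rintro ⟨k, hk, -, hokk⟩
      rcases only_two arr i hle hcase hbad k hk hokk with rfl | rfl
      · exact hx (Or.inl hokk)
      · exact hx (Or.inr hokk)
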